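-- pv_equiv track=rewrite | github.com/rodgzilla/project-euler | problem_061/problem.py | compute_dicts
-- ===== SOURCE A (Python) =====
-- def compute_dicts(number_sets):
--     set_indices = list(range(len(number_sets))) + [0]
--     dict_list = []
--     for i in range(len(set_indices) - 1):
--         d = {}
--         for number_s1 in number_sets[set_indices[i]]:
--             suffix = number_s1 % 100
--             if suffix < 10:
--                 continue
--             valid_next = set([number_s2 for number_s2 in number_sets[set_indices[i + 1]] if number_s2 // 100 == suffix])
--             if len(valid_next) > 0:
--                 d[number_s1] = valid_next
--         dict_list.append(d)
--     return dict_list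
-- ===== SOURCE B (Python) =====
-- def compute_dicts(number_sets):
--     # Hash join per cyclic pair: group set2 by prefix once, then one lookup per
--     # element of set1 -- no inner scan of set2.
--     dict_list = []
--     n = len(number_sets)
--     for i in range(n):
--         set1 = number_sets[i]
--         set2 = number_sets[(i + 1) % n]
--         prefix_groups = {}
--         for number_s2 in set2:
--             prefix_groups.setdefault(number_s2 // 100, set()).add(number_s2)
--         d = {}
--         for number_s1 in set1:
--             suffix = number_s1 % 100
--             if suffix >= 10 and suffix in prefix_groups:
--                 d[number_s1] = prefix_groups[suffix]
--         dict_list.append(d)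
--     return dict_list
-- ===== Notes on version B (the rewrite author's own statement) =====
-- stated objective: faster
-- what changed: Replaces the per-element rescan of the next set (a set-comprehension over set2 for every element of set1) by a hash join: set2 is grouped once into a prefix->set dict, then each element of set1 does a single O(1) lookup; the cyclic pairing is done with (i+1) % n instead of an index list.
import Mathlib
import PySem

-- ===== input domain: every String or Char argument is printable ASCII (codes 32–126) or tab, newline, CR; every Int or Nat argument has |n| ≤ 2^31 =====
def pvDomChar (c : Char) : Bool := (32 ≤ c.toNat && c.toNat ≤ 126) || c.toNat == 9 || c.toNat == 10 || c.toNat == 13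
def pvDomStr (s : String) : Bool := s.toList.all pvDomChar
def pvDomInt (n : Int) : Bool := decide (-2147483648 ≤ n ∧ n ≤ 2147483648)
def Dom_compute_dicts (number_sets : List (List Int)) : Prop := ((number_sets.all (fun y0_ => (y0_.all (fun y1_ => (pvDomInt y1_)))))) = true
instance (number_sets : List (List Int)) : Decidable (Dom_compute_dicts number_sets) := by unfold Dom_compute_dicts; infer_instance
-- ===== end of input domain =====

-- B replaces A's per-element rescan of the next set by a one-pass prefix grouping (hash join); proved equal on all inputs.

-- ===== PORT A =====
def compute_dicts (number_sets : List (List Int)) : List (List (Int × List Int)) :=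
  let set_indices : List Int :=
    PySem.List.pyRange 0 (number_sets.length : Int) 1 ++ [0]
  (PySem.List.pyRange 0 ((set_indices.length : Int) - 1) 1).foldl (fun dict_list i =>
    -- indices produced by the loop are always in range; pyGetD's default is never used
    let set1 := PySem.List.pyGetD number_sets (PySem.List.pyGetD set_indices i 0) []
    let set2 := PySem.List.pyGetD number_sets (PySem.List.pyGetD set_indices (i + 1) 0) []
    let d := set1.foldl (fun d number_s1 =>
      let suffix := PySem.Int.mod number_s1 100
      if suffix < 10 then d
      else
        let valid_next : PySem.Set Int :=
          PySem.Set.ofList (set2.filter (fun number_s2 => PySem.Int.floordiv number_s2 100 == suffix))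
        if valid_next.length > 0 then d.insert number_s1 valid_next else d)
      (PySem.Dict.empty : PySem.Dict Int (List Int))
    dict_list ++ [d.items]) []

-- ===== PORT B =====
def compute_dicts_alt (number_sets : List (List Int)) : List (List (Int × List Int)) :=
  (PySem.List.pyRange 0 (number_sets.length : Int) 1).foldl (fun dict_list i =>
    let set1 := PySem.List.pyGetD number_sets i []
    let set2 := PySem.List.pyGetD number_sets (PySem.Int.mod (i + 1) (number_sets.length : Int)) []
    -- 'prefix_groups.setdefault(p, set()).add(x)' = modify p with default ∅ by Set.add
    let g := set2.foldl (fun g number_s2 =>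
      g.modify (PySem.Int.floordiv number_s2 100) [] (fun s => PySem.Set.add s number_s2))
      (PySem.Dict.empty : PySem.Dict Int (List Int))
    let d := set1.foldl (fun d number_s1 =>
      let suffix := PySem.Int.mod number_s1 100
      -- 'suffix in prefix_groups' guards the lookup, so getD's default is never used
      if 10 ≤ suffix && g.contains suffix then d.insert number_s1 (g.getD suffix []) else d)
      (PySem.Dict.empty : PySem.Dict Int (List Int))
    dict_list ++ [d.items]) []

-- ===== PRECONDITION & SPEC =====
def Spec_compute_dicts (number_sets : List (List Int)) (out : List (List (Int × List Int))) : Prop := out = compute_dicts_alt number_sets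
instance (number_sets : List (List Int)) (out : List (List (Int × List Int))) : Decidable (Spec_compute_dicts number_sets out) := by unfold Spec_compute_dicts; infer_instance

-- ===== CLAIM (what is proved, stated in full; the proofs are below) =====
def Claim_equal_compute_dicts : Prop := ∀ (number_sets : List (List Int)), Dom_compute_dicts number_sets → Spec_compute_dicts number_sets (compute_dicts number_sets)

-- ===== LEMMAS AND PROOFS =====

-- the grouping fold, looked up at k, is the fold of Set.add over the matching elements
theorem group_getD (l : List Int) (g : PySem.Dict Int (List Int)) (k : Int) :
    (l.foldl (fun g n => g.modify (PySem.Int.floordiv n 100) [] (fun s => PySem.Set.add s n)) g).getD k []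
      = (l.filter (fun n => PySem.Int.floordiv n 100 == k)).foldl PySem.Set.add (g.getD k []) := by
  induction l generalizing g with
  | nil => rfl
  | cons n t ih =>
    rw [List.foldl_cons, List.filter_cons, ih, PySem.Dict.getD_modify]
    by_cases h : k = PySem.Int.floordiv n 100
    · subst h
      rw [if_pos rfl, if_pos (beq_iff_eq.mpr rfl), List.foldl_cons]
    · rw [if_neg h, if_neg (fun e => h (beq_iff_eq.mp e).symm)]

-- the grouping fold contains k iff some element has prefix k
theorem group_contains (l : List Int) (g : PySem.Dict Int (List Int)) (k : Int) :
    (l.foldl (fun g n => g.modify (PySem.Int.floordiv n 100) [] (fun s => PySem.Set.add s n)) g).contains k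
      = (g.contains k || l.any (fun n => PySem.Int.floordiv n 100 == k)) := by
  induction l generalizing g with
  | nil => simp
  | cons n t ih =>
    rw [List.foldl_cons, List.any_cons, ih, PySem.Dict.contains_modify]
    have hswap : (k == PySem.Int.floordiv n 100) = (PySem.Int.floordiv n 100 == k) := by
      rw [Bool.eq_iff_iff]
      exact ⟨fun e => beq_iff_eq.mpr (beq_iff_eq.mp e).symm,
             fun e => beq_iff_eq.mpr (beq_iff_eq.mp e).symm⟩
    rw [hswap]
    cases hb : (PySem.Int.floordiv n 100 == k) <;>
      simp only [Bool.false_or, Bool.true_or, Bool.or_true]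

theorem foldl_add_ne_nil (t : List Int) (s : PySem.Set Int) (h : s ≠ []) :
    t.foldl PySem.Set.add s ≠ [] := by
  induction t generalizing s with
  | nil => exact h
  | cons x t ih =>
    refine ih _ ?_
    simp only [PySem.Set.add]
    split <;> simp_all

-- Set.ofList of a non-empty list is non-empty
theorem ofList_ne_nil (f : List Int) (h : f ≠ []) : PySem.Set.ofList f ≠ [] := by
  cases f with
  | nil => exact absurd rfl h
  | cons x t =>
    rw [PySem.Set.ofList_eq_foldl, List.foldl_cons]
    exact foldl_add_ne_nil t (PySem.Set.add [] x) (by simp [PySem.Set.add])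

-- per pair: A's inner dict-building loop equals B's (grouping fold written out)
theorem inner_eq (set1 set2 : List Int) :
    set1.foldl (fun d number_s1 =>
      let suffix := PySem.Int.mod number_s1 100
      if suffix < 10 then d
      else
        let valid_next : PySem.Set Int :=
          PySem.Set.ofList (set2.filter (fun number_s2 => PySem.Int.floordiv number_s2 100 == suffix))
        if valid_next.length > 0 then d.insert number_s1 valid_next else d)
      (PySem.Dict.empty : PySem.Dict Int (List Int))
    = set1.foldl (fun d number_s1 =>
        if 10 ≤ PySem.Int.mod number_s1 100 &&
            (set2.foldl (fun g number_s2 =>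
              g.modify (PySem.Int.floordiv number_s2 100) [] (fun s => PySem.Set.add s number_s2))
              (PySem.Dict.empty : PySem.Dict Int (List Int))).contains (PySem.Int.mod number_s1 100)
        then d.insert number_s1
          ((set2.foldl (fun g number_s2 =>
              g.modify (PySem.Int.floordiv number_s2 100) [] (fun s => PySem.Set.add s number_s2))
              (PySem.Dict.empty : PySem.Dict Int (List Int))).getD (PySem.Int.mod number_s1 100) [])
        else d)
      (PySem.Dict.empty : PySem.Dict Int (List Int)) := by
  apply PySem.List.foldl_congr_mem
  intro d n1 _
  simp only []
  by_cases hs : PySem.Int.mod n1 100 < 10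
  · rw [if_pos hs, if_neg]
    intro e
    rw [Bool.and_eq_true] at e
    exact absurd (of_decide_eq_true e.1) (not_le.mpr hs)
  · rw [if_neg hs]
    have hc : (set2.foldl (fun g number_s2 =>
        g.modify (PySem.Int.floordiv number_s2 100) [] (fun s => PySem.Set.add s number_s2))
        (PySem.Dict.empty : PySem.Dict Int (List Int))).contains (PySem.Int.mod n1 100)
        = set2.any (fun m => PySem.Int.floordiv m 100 == PySem.Int.mod n1 100) := by
      rw [group_contains, PySem.Dict.contains_empty, Bool.false_or]
    have hg : (set2.foldl (fun g number_s2 =>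
        g.modify (PySem.Int.floordiv number_s2 100) [] (fun s => PySem.Set.add s number_s2))
        (PySem.Dict.empty : PySem.Dict Int (List Int))).getD (PySem.Int.mod n1 100) []
        = PySem.Set.ofList (set2.filter (fun m => PySem.Int.floordiv m 100 == PySem.Int.mod n1 100)) := by
      rw [group_getD, PySem.Dict.getD_empty, PySem.Set.ofList_eq_foldl]
    rw [hc, hg]
    by_cases hf : set2.filter (fun m => PySem.Int.floordiv m 100 == PySem.Int.mod n1 100) = []
    · rw [if_neg, if_neg]
      · intro e
        rw [Bool.and_eq_true] at e
        obtain ⟨x, hx, hpx⟩ := List.any_eq_true.mp e.2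
        exact List.filter_eq_nil_iff.mp hf x hx hpx
      · rw [hf]
        simp [PySem.Set.ofList]
    · rw [if_pos, if_pos]
      · rw [Bool.and_eq_true]
        refine ⟨decide_eq_true (not_lt.mp hs), List.any_eq_true.mpr ?_⟩
        obtain ⟨x, hx⟩ := List.exists_mem_of_ne_nil _ hf
        exact ⟨x, (List.mem_filter.mp hx).1, (List.mem_filter.mp hx).2⟩
      · exact Nat.pos_of_ne_zero (fun e => ofList_ne_nil _ hf (List.eq_nil_of_length_eq_zero e))

theorem compute_dicts_eq (number_sets : List (List Int)) :
    compute_dicts number_sets = compute_dicts_alt number_sets := by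
  simp only [compute_dicts, compute_dicts_alt]
  have hlen : ((PySem.List.pyRange 0 (number_sets.length : Int) 1 ++ [(0:Int)]).length : Int) - 1
      = (number_sets.length : Int) := by
    rw [List.length_append, PySem.List.length_pyRange_one]
    simp
  rw [hlen]
  apply PySem.List.foldl_congr_mem
  intro acc i hi
  rw [PySem.List.mem_pyRange_one] at hi
  obtain ⟨h0, hn⟩ := hi
  have hlr : (PySem.List.pyRange 0 (number_sets.length : Int) 1).length = number_sets.length := by
    rw [PySem.List.length_pyRange_one]; omega
  have h1 : PySem.List.pyGetD (PySem.List.pyRange 0 (number_sets.length : Int) 1 ++ [(0:Int)]) i 0 = i := by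
    have hidx : i.toNat < (PySem.List.pyRange 0 (number_sets.length : Int) 1).length := by
      rw [hlr]; omega
    rw [PySem.List.pyGetD_eq_getElem _ _ h0 (by rw [List.length_append, hlr]; push_cast; omega),
        List.getElem_append_left hidx, PySem.List.getElem_pyRange_one]
    omega
  have h2 : PySem.List.pyGetD (PySem.List.pyRange 0 (number_sets.length : Int) 1 ++ [(0:Int)]) (i + 1) 0
      = PySem.Int.mod (i + 1) (number_sets.length : Int) := by
    have hb2 : i + 1 < (((PySem.List.pyRange 0 (number_sets.length : Int) 1 ++ [(0:Int)]).length : Nat) : Int) := by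
      rw [List.length_append, hlr, List.length_singleton]; push_cast; omega
    rw [PySem.List.pyGetD_eq_getElem _ _ (by omega) hb2,
        PySem.Int.mod_eq_emod_of_pos (by omega)]
    by_cases hlt : i + 1 < (number_sets.length : Int)
    · have hidx : (i + 1).toNat < (PySem.List.pyRange 0 (number_sets.length : Int) 1).length := by
        rw [hlr]; omega
      rw [List.getElem_append_left hidx, PySem.List.getElem_pyRange_one,
          Int.emod_eq_of_lt (by omega) hlt]
      omega
    · have heq : i + 1 = (number_sets.length : Int) := by omega
      have hge : (PySem.List.pyRange 0 (number_sets.length : Int) 1).length ≤ (i + 1).toNat := by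
        rw [hlr]; omega
      rw [List.getElem_append_right hge, List.getElem_singleton, heq, Int.emod_self]
  rw [h1, h2, inner_eq]

-- ===== VERDICT (by name: the statement is the Claim_ definition above) =====
theorem compute_dicts_spec : Claim_equal_compute_dicts := by
  intro ns _
  exact compute_dicts_eq ns
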